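-- pv_equiv track=rewrite | github.com/zzusp/spec-agent | scripts/spec_agent_ops.py | normalize_cli_args
-- ===== SOURCE A (Python) =====
-- def normalize_cli_args(argv: list[str]) -> list[str]:
--     global_flags = {"--json-output", "--verbose"}
--     front = []
--     rest = []
--     for arg in argv:
--         if arg in global_flags:
--             front.append(arg)
--         else:
--             rest.append(arg)
--     return front + rest
-- ===== SOURCE B (Python) =====
-- def normalize_cli_args(argv: list[str]) -> list[str]:
--     return sorted(argv, key=lambda a: a not in {"--json-output", "--verbose"})
-- ===== Notes on version B (the rewrite author's own statement) =====
-- stated objective: idiomatic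
-- what changed: Replaced the explicit two-list partition loop with a single stable sort keyed on 'is not a global flag', relying on sort stability to keep the original relative order within each group.
import Mathlib
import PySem

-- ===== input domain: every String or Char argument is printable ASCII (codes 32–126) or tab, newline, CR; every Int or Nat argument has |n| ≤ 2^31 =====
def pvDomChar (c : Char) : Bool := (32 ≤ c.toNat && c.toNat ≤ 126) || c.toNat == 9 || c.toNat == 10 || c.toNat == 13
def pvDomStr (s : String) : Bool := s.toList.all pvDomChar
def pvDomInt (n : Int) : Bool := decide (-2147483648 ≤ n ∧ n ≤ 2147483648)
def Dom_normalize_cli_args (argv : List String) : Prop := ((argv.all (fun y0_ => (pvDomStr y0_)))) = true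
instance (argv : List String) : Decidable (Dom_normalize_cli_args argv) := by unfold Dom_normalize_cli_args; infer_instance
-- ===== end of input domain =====

-- ===== PORT A =====
-- B replaces A's explicit two-list partition loop with one stable sort by a boolean key (idiomatic; return value only).
def normalize_cli_args (argv : List String) : List String :=
  let p := argv.foldl
    (fun (acc : List String × List String) arg =>
      if arg == "--json-output" || arg == "--verbose" then (acc.1 ++ [arg], acc.2)
      else (acc.1, acc.2 ++ [arg]))
    ([], [])
  p.1 ++ p.2

-- ===== PORT B =====
-- key = (arg not in {"--json-output","--verbose"}): False (0) for global flags, True (1) otherwise; Python's sort is stable.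
def pvKey (a : String) : Int :=
  if a == "--json-output" || a == "--verbose" then 0 else 1

def normalize_cli_args_alt (argv : List String) : List String :=
  PySem.List.sorted argv pvKey false

-- ===== PRECONDITION & SPEC =====
def Spec_normalize_cli_args (argv : List String) (out : List String) : Prop := out = normalize_cli_args_alt argv
instance (argv : List String) (out : List String) : Decidable (Spec_normalize_cli_args argv out) := by unfold Spec_normalize_cli_args; infer_instance

-- ===== CLAIM (what is proved, stated in full; the proofs are below) =====
def Claim_equal_normalize_cli_args : Prop := ∀ (argv : List String), Dom_normalize_cli_args argv → Spec_normalize_cli_args argv (normalize_cli_args argv)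

-- ===== LEMMAS AND PROOFS =====

def pvIsFlag (a : String) : Bool := a == "--json-output" || a == "--verbose"

theorem pvKey_eq (a : String) : pvKey a = if pvIsFlag a then 0 else 1 := by
  simp [pvKey, pvIsFlag]

theorem pvA_foldl (xs : List String) (f r : List String) :
    xs.foldl
      (fun (acc : List String × List String) arg =>
        if arg == "--json-output" || arg == "--verbose" then (acc.1 ++ [arg], acc.2)
        else (acc.1, acc.2 ++ [arg]))
      (f, r)
    = (f ++ xs.filter pvIsFlag, r ++ xs.filter (fun a => !pvIsFlag a)) := by
  induction xs generalizing f r with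
  | nil => simp
  | cons x xs ih =>
      rw [List.foldl_cons]
      by_cases hx : (x == "--json-output" || x == "--verbose") = true
      · rw [if_pos hx, ih]
        have h' : pvIsFlag x = true := hx
        simp [h']
      · rw [if_neg hx, ih]
        have h' : pvIsFlag x = false := eq_false_of_ne_true hx
        simp [h']

theorem pvInsert_mid (x : String) (F R : List String)
    (hF : ∀ a ∈ F, ¬ pvKey x < pvKey a)
    (hR : ∀ a ∈ R, pvKey x < pvKey a) :
    PySem.List.insertBy (fun a b => decide (pvKey a < pvKey b)) x (F ++ R) = F ++ x :: R := by
  induction F with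
  | nil =>
      cases R with
      | nil => simp [PySem.List.insertBy]
      | cons r rs =>
          have := hR r (by simp)
          simp [PySem.List.insertBy, this]
  | cons a F ih =>
      have ha : ¬ (pvKey x < pvKey a) := hF a (by simp)
      simp only [List.cons_append, PySem.List.insertBy, decide_eq_true_eq, ha, if_false]
      rw [ih (fun b hb => hF b (by simp [hb]))]

theorem pvB_char (xs : List String) :
    PySem.List.sorted xs pvKey false = xs.filter pvIsFlag ++ xs.filter (fun a => !pvIsFlag a) := by
  rw [PySem.List.sorted_eq_foldl_insertBy]
  induction xs using List.reverseRecOn with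
  | nil => simp
  | append_singleton ys x ih =>
      rw [List.foldl_append, List.foldl_cons, List.foldl_nil, ih]
      by_cases hx : pvIsFlag x = true
      · rw [pvInsert_mid]
        · simp [List.filter_append, hx, List.filter_nil]
        · intro a ha
          have h2 : pvIsFlag a = true := (List.mem_filter.mp ha).2
          rw [pvKey_eq, pvKey_eq, hx, h2]; omega
        · intro a ha
          have h2 : pvIsFlag a = false := by
            have := (List.mem_filter.mp ha).2; simpa using this
          rw [pvKey_eq, pvKey_eq, hx, h2]; norm_num
      · rw [PySem.List.insertBy_of_forall_not_before]
        · simp [List.filter_append, hx, List.filter_nil]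
        · intro y hy
          have h' : pvIsFlag x = false := eq_false_of_ne_true hx
          simp only [decide_eq_false_iff_not, not_lt]
          rw [pvKey_eq, pvKey_eq, h']
          split <;> norm_num

-- ===== VERDICT (by name: the statement is the Claim_ definition above) =====
theorem normalize_cli_args_spec : Claim_equal_normalize_cli_args := by
  intro argv _
  unfold Spec_normalize_cli_args normalize_cli_args normalize_cli_args_alt
  rw [pvA_foldl argv [] [], pvB_char]
  simp [pvIsFlag]
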